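-- pv_equiv track=rewrite | github.com/basharmd94/streamlit-v2 | modules/views.py | _anchor_orders
-- ===== SOURCE A (Python) =====
-- def _anchor_orders(order_sets: dict, anchors: set[str], mode: str) -> set:
--     """
--     mode: 'ALL' (intersection) or 'ANY' (union)
--     """
--     if not anchors:
--         return set()
--     out = set()
--     if mode == "ALL":
--         for oid, s in order_sets.items():
--             if anchors.issubset(s):
--                 out.add(oid)
--     else:
--         for oid, s in order_sets.items():
--             if s.intersection(anchors):
--                 out.add(oid)
--     return out
-- ===== SOURCE B (Python) =====
-- def _anchor_orders(order_sets: dict, anchors: set, mode: str) -> set: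
--     """Inverted-index formulation: one pass over the orders builds a posting set
--     of order indices per anchor; the posting sets are combined by set
--     intersection ('ALL') or union (otherwise) and the surviving indices, in
--     ascending order, are mapped back to order ids."""
--     if not anchors:
--         return set()
--     oids = list(order_sets.keys())
--     index = {a: set() for a in anchors}
--     for i, s in enumerate(order_sets.values()):
--         for a in s & anchors:
--             index[a].add(i)
--     postings = list(index.values())
--     if mode == "ALL":
--         idx = set.intersection(*postings)
--     else:
--         idx = set.union(*postings)
--     return {oids[i] for i in sorted(idx)}
-- ===== Notes on version B (the rewrite author's own statement) =====
-- stated objective: alternative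
-- what changed: Replaces A's loop that tests each order's item set directly against the anchors with an inverted index built in one pass over the orders (a dict mapping each anchor to its posting set of order indices); the posting sets are combined by set intersection ('ALL') or union (otherwise) and the sorted surviving indices are mapped back to order ids.
import Mathlib
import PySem

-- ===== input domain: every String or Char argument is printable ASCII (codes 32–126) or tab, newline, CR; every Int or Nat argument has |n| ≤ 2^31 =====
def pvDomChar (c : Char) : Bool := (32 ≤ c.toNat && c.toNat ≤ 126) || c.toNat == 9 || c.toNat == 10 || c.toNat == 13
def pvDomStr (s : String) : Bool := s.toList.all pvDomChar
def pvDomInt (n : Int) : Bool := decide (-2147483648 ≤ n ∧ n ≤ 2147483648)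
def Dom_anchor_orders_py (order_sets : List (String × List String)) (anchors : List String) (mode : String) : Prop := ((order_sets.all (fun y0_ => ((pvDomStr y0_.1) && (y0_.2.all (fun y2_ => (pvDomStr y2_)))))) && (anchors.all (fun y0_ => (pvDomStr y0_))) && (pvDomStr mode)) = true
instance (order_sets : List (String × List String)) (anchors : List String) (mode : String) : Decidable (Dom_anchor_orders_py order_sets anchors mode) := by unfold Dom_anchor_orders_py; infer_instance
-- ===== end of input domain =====

-- B replaces A's per-order membership loop by an inverted index built in one pass (a dict of per-anchor posting sets of order indices, combined by set intersection/union, then mapped back to order ids): alternative decomposition, similar cost.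


-- ===== PORT A =====
def anchor_orders_py (order_sets : List (String × List String)) (anchors : List String) (mode : String) : List String :=
  if anchors = [] then
    PySem.Set.empty
  else if mode = "ALL" then
    order_sets.foldl (fun out p => if PySem.Set.issubset anchors p.2 then PySem.Set.add out p.1 else out) PySem.Set.empty
  else
    order_sets.foldl (fun out p => if PySem.Set.inter p.2 anchors ≠ [] then PySem.Set.add out p.1 else out) PySem.Set.empty

-- ===== PORT B =====
-- index = {a: set() for a in anchors}
def pvIndex0 (anchors : List String) : PySem.Dict String (List Int) :=
  anchors.foldl (fun d a => PySem.Dict.insert d a PySem.Set.empty) PySem.Dict.empty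

-- for i, s in enumerate(sets): for a in s & anchors: index[a].add(i)
-- (every a drawn from s & anchors is a key of the dict, so Dict.modify's default is never used)
def pvIndex (anchors : List String) (sets : List (List String)) : PySem.Dict String (List Int) :=
  (PySem.List.enumerate sets).foldl
    (fun d p => (PySem.Set.inter p.2 anchors).foldl
      (fun d' a => PySem.Dict.modify d' a PySem.Set.empty (fun v => PySem.Set.add v p.1)) d)
    (pvIndex0 anchors)

def anchor_orders_py_alt (order_sets : List (String × List String)) (anchors : List String) (mode : String) : List String :=
  match anchors with
  | [] => PySem.Set.empty
  | _ :: _ =>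
    let oids := order_sets.map Prod.fst
    let postings := PySem.Dict.values (pvIndex anchors (order_sets.map Prod.snd))
    -- set.intersection(*postings) / set.union(*postings); postings is nonempty because anchors is
    let idx : List Int :=
      if mode = "ALL" then (postings.tail).foldl PySem.Set.inter (postings.headD [])
      else (postings.tail).foldl PySem.Set.union (postings.headD [])
    -- {oids[i] for i in sorted(idx)}; every i ∈ idx is a valid index of oids, so the getD default is never used
    PySem.Set.ofList ((PySem.List.sorted idx (fun x => x)).map
      (fun i => (PySem.List.pyGet? oids i).getD ""))

-- ===== PRECONDITION & SPEC =====
def Spec_anchor_orders_py (order_sets : List (String × List String)) (anchors : List String) (mode : String) (out : List String) : Prop := out = anchor_orders_py_alt order_sets anchors mode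
instance (order_sets : List (String × List String)) (anchors : List String) (mode : String) (out : List String) : Decidable (Spec_anchor_orders_py order_sets anchors mode out) := by unfold Spec_anchor_orders_py; infer_instance

-- ===== CLAIM (what is proved, stated in full; the proofs are below) =====
def Claim_equal_anchor_orders_py : Prop := ∀ (order_sets : List (String × List String)) (anchors : List String) (mode : String), Dom_anchor_orders_py order_sets anchors mode → Spec_anchor_orders_py order_sets anchors mode (anchor_orders_py order_sets anchors mode)

-- ===== LEMMAS AND PROOFS =====

-- the per-order qualifying test both programs compute, as one predicate
def pvQual (anchors : List String) (mode : String) (s : List String) : Bool :=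
  if mode = "ALL" then anchors.all (fun a => s.contains a) else anchors.any (fun a => s.contains a)

-- the posting set of order indices of one anchor, as a closed expression
def pvPosting (sets : List (List String)) (a : String) : List Int :=
  PySem.Set.ofList (((PySem.List.enumerate sets).filter (fun p => p.2.contains a)).map (fun p => p.1))

theorem inter_ne_eq_any (t s : List String) : decide (PySem.Set.inter t s ≠ []) = s.any (fun a => t.contains a) := by
  rw [Bool.eq_iff_iff]
  simp [PySem.Set.inter, List.filter_eq_nil_iff]
  tauto

theorem a_eq_filter (order_sets : List (String × List String)) (anchors : List String) (mode : String)
    (hA : anchors ≠ []) :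
    anchor_orders_py order_sets anchors mode
      = PySem.Set.ofList ((order_sets.filter (fun p => pvQual anchors mode p.2)).map Prod.fst) := by
  by_cases hM : mode = "ALL"
  · subst hM
    simp only [anchor_orders_py, if_neg hA, reduceIte]
    rw [PySem.List.foldl_if_eq_foldl_filter, PySem.Set.ofList_eq_foldl, List.foldl_map,
      show (PySem.Set.empty : List String) = [] from rfl]
    congr 1
  · simp only [anchor_orders_py, if_neg hA, if_neg hM]
    rw [PySem.List.foldl_ite_eq_foldl_filter, PySem.Set.ofList_eq_foldl, List.foldl_map]
    congr 1
    apply List.filter_congr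
    intro p _
    rw [inter_ne_eq_any]
    simp [pvQual, hM]

theorem mem_pvPosting (sets : List (List String)) (a : String) (i : Int) :
    i ∈ pvPosting sets a ↔ ∃ k, ∃ _ : k < sets.length, i = (k : Int) ∧ sets[k].contains a := by
  simp [pvPosting, PySem.Set.mem_ofList, List.mem_filter, PySem.List.mem_enumerate_iff]

theorem mem_foldl_inter (ps : List (List Int)) (acc : List Int) (i : Int) :
    i ∈ ps.foldl PySem.Set.inter acc ↔ i ∈ acc ∧ ∀ t ∈ ps, i ∈ t := by
  induction ps generalizing acc with
  | nil => simp
  | cons t ps ih => simp [ih, PySem.Set.mem_inter]; tauto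

theorem mem_foldl_union (ps : List (List Int)) (acc : List Int) (i : Int) :
    i ∈ ps.foldl PySem.Set.union acc ↔ i ∈ acc ∨ ∃ t ∈ ps, i ∈ t := by
  induction ps generalizing acc with
  | nil => simp
  | cons t ps ih => simp [ih, PySem.Set.mem_union]; tauto

theorem nodup_foldl_inter (ps : List (List Int)) (acc : List Int) (h : acc.Nodup) :
    (ps.foldl PySem.Set.inter acc).Nodup := by
  induction ps generalizing acc with
  | nil => exact h
  | cons t ps ih => exact ih _ (PySem.Set.nodup_inter _ _ h)

theorem nodup_foldl_union (ps : List (List Int)) (acc : List Int) (h : acc.Nodup) :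
    (ps.foldl PySem.Set.union acc).Nodup := by
  induction ps generalizing acc with
  | nil => exact h
  | cons t ps ih => exact ih _ (PySem.Set.nodup_union _ _ h)

theorem set_add_of_mem {α : Type} [BEq α] [LawfulBEq α] (s : List α) (x : α) (h : x ∈ s) :
    PySem.Set.add s x = s := by
  simp [PySem.Set.add, h]

theorem set_add_of_not_mem {α : Type} [BEq α] [LawfulBEq α] (s : List α) (x : α) (h : x ∉ s) :
    PySem.Set.add s x = s ++ [x] := by
  simp [PySem.Set.add, h]

-- {a: set() for a in anchors}: dedup keys, each bound to the empty set
theorem insert_fold (xs M : List String) :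
    xs.foldl (fun d a => PySem.Dict.insert d a PySem.Set.empty)
        ⟨M.map (fun a => (a, ([] : List Int)))⟩
      = ⟨(xs.foldl PySem.Set.add M).map (fun a => (a, []))⟩ := by
  induction xs generalizing M with
  | nil => rfl
  | cons x xs ih =>
    have hstep : PySem.Dict.insert (⟨M.map (fun a => (a, ([] : List Int)))⟩ : PySem.Dict String (List Int)) x PySem.Set.empty
        = ⟨(PySem.Set.add M x).map (fun a => (a, []))⟩ := by
      by_cases h : x ∈ M
      · have hc : (⟨M.map (fun a => (a, ([] : List Int)))⟩ : PySem.Dict String (List Int)).contains x = true := by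
          simp [PySem.Dict.contains, List.any_map]
          exact h
        simp only [PySem.Dict.insert, hc, if_pos]
        congr 1
        rw [List.map_map, set_add_of_mem M x h]
        apply List.map_congr_left
        intro a _
        by_cases hax : a = x <;> simp [hax, PySem.Set.empty]
      · have hc : (⟨M.map (fun a => (a, ([] : List Int)))⟩ : PySem.Dict String (List Int)).contains x = false := by
          simp [PySem.Dict.contains, List.any_map]
          intro b hb hbx
          exact h (hbx ▸ hb)
        simp only [PySem.Dict.insert, hc, Bool.false_eq_true, if_false]
        rw [set_add_of_not_mem M x h]
        simp [PySem.Set.empty]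
    rw [List.foldl_cons, hstep, ih, List.foldl_cons]

theorem dict_getD_map (M : List String) (g : String → List Int) (x : String)
    (hx : x ∈ M) :
    (⟨M.map (fun a => (a, g a))⟩ : PySem.Dict String (List Int)).getD x [] = g x := by
  induction M with
  | nil => simp at hx
  | cons b M ih =>
    by_cases hbx : b = x
    · subst hbx
      simp [PySem.Dict.getD, PySem.Dict.get?]
    · have hx' : x ∈ M := by
        rcases List.mem_cons.mp hx with h | h
        · exact absurd h.symm hbx
        · exact h
      have := ih hx'
      simpa [PySem.Dict.getD, PySem.Dict.get?, hbx] using this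

-- one order's inner loop: each anchor of s & anchors gets the index added to its posting
theorem modify_fold (xs M : List String) (g : String → List Int) (i : Int)
    (hxs : ∀ a ∈ xs, a ∈ M) :
    xs.foldl (fun d a => PySem.Dict.modify d a PySem.Set.empty (fun v => PySem.Set.add v i))
        ⟨M.map (fun a => (a, g a))⟩
      = ⟨M.map (fun a => (a, if xs.contains a then PySem.Set.add (g a) i else g a))⟩ := by
  induction xs generalizing g with
  | nil => simp
  | cons x xs ih =>
    have hxM : x ∈ M := hxs x List.mem_cons_self
    have hstep : PySem.Dict.modify (⟨M.map (fun a => (a, g a))⟩ : PySem.Dict String (List Int)) x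
          PySem.Set.empty (fun v => PySem.Set.add v i)
        = ⟨M.map (fun a => (a, if a = x then PySem.Set.add (g a) i else g a))⟩ := by
      have hc : (⟨M.map (fun a => (a, g a))⟩ : PySem.Dict String (List Int)).contains x = true := by
        simp only [PySem.Dict.contains]
        rw [List.any_map]
        simp only [List.any_eq_true]
        exact ⟨x, hxM, by simp⟩
      simp only [PySem.Dict.modify, PySem.Dict.insert, hc, if_pos]
      rw [show PySem.Dict.getD (⟨M.map (fun a => (a, g a))⟩ : PySem.Dict String (List Int)) x PySem.Set.empty
            = g x from dict_getD_map M g x hxM]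
      congr 1
      rw [List.map_map, List.map_congr_left]
      intro a _
      by_cases hax : a = x <;> simp [hax]
    rw [List.foldl_cons, hstep,
      ih (fun a => if a = x then PySem.Set.add (g a) i else g a) (fun a ha => hxs a (List.mem_cons_of_mem x ha))]
    congr 1
    apply List.map_congr_left
    intro a _
    by_cases hax : a = x
    · subst hax
      by_cases hxs' : a ∈ xs <;> simp [hxs']
    · simp [hax]

-- the whole pass: every tracked anchor's value becomes its posting fold
theorem pvIndex_fold (anchors : List String) (orders : List (Int × List String)) (M : List String)
    (hM : ∀ a, a ∈ M ↔ a ∈ anchors) (g : String → List Int) :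
    orders.foldl (fun d p => (PySem.Set.inter p.2 anchors).foldl
        (fun d' a => PySem.Dict.modify d' a PySem.Set.empty (fun v => PySem.Set.add v p.1)) d)
      ⟨M.map (fun a => (a, g a))⟩
    = ⟨M.map (fun a => (a, orders.foldl (fun v q => if q.2.contains a then PySem.Set.add v q.1 else v) (g a)))⟩ := by
  induction orders generalizing g with
  | nil => simp
  | cons q orders ih =>
    have hsub : ∀ a ∈ PySem.Set.inter q.2 anchors, a ∈ M := by
      intro a ha
      have : a ∈ anchors := by
        have := List.mem_filter.mp ha
        simpa using this.2
      exact (hM a).mpr this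
    rw [List.foldl_cons, modify_fold (PySem.Set.inter q.2 anchors) M g q.1 hsub]
    have hpt : (⟨M.map (fun a => (a, if List.contains (PySem.Set.inter q.2 anchors) a then PySem.Set.add (g a) q.1 else g a))⟩ : PySem.Dict String (List Int))
        = ⟨M.map (fun a => (a, if q.2.contains a then PySem.Set.add (g a) q.1 else g a))⟩ := by
      congr 1
      apply List.map_congr_left
      intro a haM
      have haA : a ∈ anchors := (hM a).mp haM
      have hca : List.contains (PySem.Set.inter q.2 anchors) a = q.2.contains a := by
        rw [Bool.eq_iff_iff]
        simp [PySem.Set.inter, List.mem_filter, haA]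
      rw [hca]
    rw [hpt, ih (fun a => if q.2.contains a then PySem.Set.add (g a) q.1 else g a)]
    simp only [List.foldl_cons]

theorem values_pvIndex (anchors : List String) (sets : List (List String)) :
    PySem.Dict.values (pvIndex anchors sets)
      = (PySem.Set.ofList anchors).map (pvPosting sets) := by
  have h0 : pvIndex0 anchors
      = ⟨(PySem.Set.ofList anchors).map (fun a => (a, []))⟩ := by
    have := insert_fold anchors []
    simpa [PySem.Set.ofList_eq_foldl, PySem.Dict.empty] using this
  rw [pvIndex, h0,
    pvIndex_fold anchors (PySem.List.enumerate sets) (PySem.Set.ofList anchors)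
      (fun a => PySem.Set.mem_ofList anchors a) (fun _ => [])]
  simp only [PySem.Dict.values, List.map_map]
  apply List.map_congr_left
  intro a _
  show (PySem.List.enumerate sets).foldl (fun v q => if q.2.contains a then PySem.Set.add v q.1 else v) [] = pvPosting sets a
  rw [PySem.List.foldl_if_eq_foldl_filter, pvPosting, PySem.Set.ofList_eq_foldl, List.foldl_map]

-- foldl of Set.add only appends, so the accumulator stays a prefix
theorem foldl_add_prefix (xs acc : List String) :
    ∃ t, xs.foldl PySem.Set.add acc = acc ++ t ∧ ∀ a ∈ t, a ∈ xs := by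
  induction xs generalizing acc with
  | nil => exact ⟨[], by simp⟩
  | cons x xs ih =>
    rw [List.foldl_cons]
    by_cases h : x ∈ acc
    · rw [set_add_of_mem acc x h]
      obtain ⟨t, ht, hm⟩ := ih acc
      exact ⟨t, ht, fun a ha => List.mem_cons_of_mem x (hm a ha)⟩
    · rw [set_add_of_not_mem acc x h]
      obtain ⟨t, ht, hm⟩ := ih (acc ++ [x])
      refine ⟨x :: t, by simpa using ht, ?_⟩
      intro a ha
      rcases List.mem_cons.mp ha with ha | ha
      · exact ha ▸ List.mem_cons_self
      · exact List.mem_cons_of_mem x (hm a ha)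

-- mapping the filtered enumeration back through oids, with a pointwise description of the lookups
theorem pvFinal (oids : List String) (os : List (String × List String))
    (q : (String × List String) → Bool) (s : Int)
    (h : ∀ (k : Nat) (hk : k < os.length), PySem.List.pyGet? oids (s + k) = some ((os[k]'hk).1)) :
    ((PySem.List.enumerate os s).filter (fun p => q p.2)).map
        (fun p => (PySem.List.pyGet? oids p.1).getD "")
      = (os.filter q).map Prod.fst := by
  induction os generalizing s with
  | nil => simp [PySem.List.enumerate]
  | cons x os ih =>
    rw [PySem.List.enumerate_cons]
    have h0 : PySem.List.pyGet? oids s = some x.1 := by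
      have := h 0 (by simp)
      simpa using this
    have hshift : ∀ (k : Nat) (hk : k < os.length), PySem.List.pyGet? oids (s + 1 + k) = some ((os[k]'hk).1) := by
      intro k hk
      have := h (k + 1) (by simp; omega)
      have harith : s + ((k : Int) + 1) = s + 1 + k := by omega
      simpa [harith] using this
    by_cases hx : q x
    · simp [hx, ih (s + 1) hshift, h0]
    · simp [hx, ih (s + 1) hshift]

-- the sorted surviving indices, mapped back through oids, are exactly A's filtered oids
theorem final_map (os : List (String × List String)) (anchors : List String) (mode : String)
    (idx : List Int)
    (hmem : ∀ i, i ∈ idx ↔ ∃ k, ∃ _ : k < os.length, i = (k : Int) ∧ pvQual anchors mode os[k].2)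
    (hnd : idx.Nodup) :
    (PySem.List.sorted idx (fun x => x)).map (fun i => (PySem.List.pyGet? (os.map Prod.fst) i).getD "")
      = (os.filter (fun p => pvQual anchors mode p.2)).map Prod.fst := by
  have hQpw : ((PySem.List.enumerate os).filter (fun p => pvQual anchors mode p.2.2)).Pairwise
      (fun p q => p.1 < q.1) :=
    (PySem.List.pairwise_lt_enumerate os 0).filter _
  have hQipw : (((PySem.List.enumerate os).filter (fun p => pvQual anchors mode p.2.2)).map
      (fun p => p.1)).Pairwise (· < ·) := by
    rw [List.pairwise_map]; exact hQpw
  have hQnd : (((PySem.List.enumerate os).filter (fun p => pvQual anchors mode p.2.2)).map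
      (fun p => p.1)).Nodup := hQipw.imp ne_of_lt
  have hQmem : ∀ i, i ∈ ((PySem.List.enumerate os).filter (fun p => pvQual anchors mode p.2.2)).map
      (fun p => p.1) ↔ ∃ k, ∃ _ : k < os.length, i = (k : Int) ∧ pvQual anchors mode os[k].2 := by
    intro i
    simp [List.mem_filter, PySem.List.mem_enumerate_iff]
  have hperm : (((PySem.List.enumerate os).filter (fun p => pvQual anchors mode p.2.2)).map
      (fun p => p.1)).Perm idx :=
    (List.perm_ext_iff_of_nodup hQnd hnd).mpr (fun i => (hQmem i).trans (hmem i).symm)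
  rw [PySem.List.sorted_eq_of_perm_of_pairwise_lt idx _ _ hperm hQipw, List.map_map]
  exact pvFinal (os.map Prod.fst) os (fun y => pvQual anchors mode y.2) 0
    (by
      intro k hk
      have : ((0 : Int) + (k : Nat)) = ((k : Nat) : Int) := by omega
      rw [this, PySem.List.pyGet?_natCast, List.getElem?_eq_getElem (by simpa using hk)]
      simp)

theorem alt_eq_filter (order_sets : List (String × List String)) (a0 : String) (rest : List String) (mode : String) :
    anchor_orders_py_alt order_sets (a0 :: rest) mode
      = PySem.Set.ofList ((order_sets.filter (fun p => pvQual (a0 :: rest) mode p.2)).map Prod.fst) := by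
  obtain ⟨L, hL, hLsub⟩ := foldl_add_prefix rest [a0]
  have hofl : PySem.Set.ofList (a0 :: rest) = a0 :: L := by
    rw [PySem.Set.ofList_eq_foldl, List.foldl_cons,
      show PySem.Set.add [] a0 = [a0] from rfl]
    simpa using hL
  have hcov : ∀ a ∈ rest, a = a0 ∨ a ∈ L := by
    intro a ha
    have : a ∈ PySem.Set.ofList (a0 :: rest) := (PySem.Set.mem_ofList _ _).mpr (List.mem_cons_of_mem a0 ha)
    rw [hofl] at this
    simpa using this
  simp only [anchor_orders_py_alt, values_pvIndex, hofl, List.map_cons, List.tail_cons, List.headD_cons]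
  by_cases hM : mode = "ALL"
  · subst hM
    rw [if_pos rfl]
    congr 1
    apply final_map
    · intro i
      rw [mem_foldl_inter]
      have hq : ∀ s : List String, pvQual (a0 :: rest) "ALL" s
          = (s.contains a0 && rest.all fun a => s.contains a) := by
        intro s; simp [pvQual]
      constructor
      · rintro ⟨h0, hrest⟩
        rw [mem_pvPosting] at h0
        obtain ⟨k, hk, rfl, hc0⟩ := h0
        refine ⟨k, by simpa using hk, rfl, ?_⟩
        rw [hq]
        simp only [Bool.and_eq_true, List.all_eq_true]
        refine ⟨by simpa [List.getElem_map] using hc0, ?_⟩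
        intro a ha
        rcases hcov a ha with rfl | haL
        · simpa [List.getElem_map] using hc0
        · have hm := hrest (pvPosting (order_sets.map Prod.snd) a) (List.mem_map_of_mem haL)
          rw [mem_pvPosting] at hm
          obtain ⟨k2, hk2, hkk, hc⟩ := hm
          have : k2 = k := by omega
          subst this
          simpa [List.getElem_map] using hc
      · rintro ⟨k, hk, rfl, hqk⟩
        rw [hq] at hqk
        simp only [Bool.and_eq_true, List.all_eq_true] at hqk
        obtain ⟨h0, hr⟩ := hqk
        constructor
        · rw [mem_pvPosting]
          exact ⟨k, by simpa using hk, rfl, by simpa [List.getElem_map] using h0⟩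
        · intro t ht
          obtain ⟨a, ha, rfl⟩ := List.mem_map.mp ht
          rw [mem_pvPosting]
          exact ⟨k, by simpa using hk, rfl, by simpa [List.getElem_map] using hr a (hLsub a ha)⟩
    · exact nodup_foldl_inter _ _ (PySem.Set.nodup_ofList _)
  · rw [if_neg hM]
    congr 1
    apply final_map
    · intro i
      rw [mem_foldl_union]
      have hq : ∀ s : List String, (pvQual (a0 :: rest) mode s = true ↔
          ∃ a, (a = a0 ∨ a ∈ rest) ∧ s.contains a) := by
        intro s
        simp [pvQual, hM, List.any_eq_true]
      constructor
      · rintro (h0 | ⟨t, ht, hi⟩)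
        · rw [mem_pvPosting] at h0
          obtain ⟨k, hk, rfl, hc0⟩ := h0
          refine ⟨k, by simpa using hk, rfl, ?_⟩
          rw [hq]
          exact ⟨a0, Or.inl rfl, by simpa [List.getElem_map] using hc0⟩
        · obtain ⟨a, ha, rfl⟩ := List.mem_map.mp ht
          rw [mem_pvPosting] at hi
          obtain ⟨k, hk, rfl, hc⟩ := hi
          refine ⟨k, by simpa using hk, rfl, ?_⟩
          rw [hq]
          exact ⟨a, Or.inr (hLsub a ha), by simpa [List.getElem_map] using hc⟩
      · rintro ⟨k, hk, rfl, hqk⟩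
        rw [hq] at hqk
        obtain ⟨a, haor, hc⟩ := hqk
        rcases haor with rfl | ha
        · exact Or.inl ((mem_pvPosting _ _ _).mpr
            ⟨k, by simpa using hk, rfl, by simpa [List.getElem_map] using hc⟩)
        · rcases hcov a ha with rfl | haL
          · exact Or.inl ((mem_pvPosting _ _ _).mpr
              ⟨k, by simpa using hk, rfl, by simpa [List.getElem_map] using hc⟩)
          · exact Or.inr ⟨pvPosting (order_sets.map Prod.snd) a, List.mem_map_of_mem haL,
              (mem_pvPosting _ _ _).mpr
                ⟨k, by simpa using hk, rfl, by simpa [List.getElem_map] using hc⟩⟩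
    · exact nodup_foldl_union _ _ (PySem.Set.nodup_ofList _)

-- ===== VERDICT (by name: the statement is the Claim_ definition above) =====
theorem anchor_orders_py_spec : Claim_equal_anchor_orders_py := by
  intro order_sets anchors mode _
  show anchor_orders_py order_sets anchors mode = anchor_orders_py_alt order_sets anchors mode
  cases anchors with
  | nil => simp [anchor_orders_py, anchor_orders_py_alt]
  | cons a0 rest =>
    rw [a_eq_filter order_sets (a0 :: rest) mode (by simp), alt_eq_filter]
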